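-- pv_equiv track=rewrite | github.com/yusrak33/Dental-clinic-Chatbot- | app.py | is_asking_for_list
-- ===== SOURCE A (Python) =====
-- def is_asking_for_list(user_input):
--     """Check if the user is asking for a list format"""
--     list_keywords = [
--         "list",
--         "listing",
--         "show me list",
--         "give me list",
--         "in list format",
--         "as a list",
--     ]
--     user_input_lower = user_input.lower()
--
--     for keyword in list_keywords:
--         if keyword in user_input_lower:
--             return True
--
--     return False
-- ===== SOURCE B (Python) =====
-- def is_asking_for_list(user_input):
--     """Check if the user is asking for a list format"""
--     # Every keyword A scans for is a superstring of "list", so one test suffices.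
--     return "list" in user_input.lower()
-- ===== Notes on version B (the rewrite author's own statement) =====
-- stated objective: simpler
-- what changed: Replaced the keyword-list loop by a single substring test: every keyword contains "list", so the whole scan collapses to '"list" in user_input.lower()'.
import Mathlib
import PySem

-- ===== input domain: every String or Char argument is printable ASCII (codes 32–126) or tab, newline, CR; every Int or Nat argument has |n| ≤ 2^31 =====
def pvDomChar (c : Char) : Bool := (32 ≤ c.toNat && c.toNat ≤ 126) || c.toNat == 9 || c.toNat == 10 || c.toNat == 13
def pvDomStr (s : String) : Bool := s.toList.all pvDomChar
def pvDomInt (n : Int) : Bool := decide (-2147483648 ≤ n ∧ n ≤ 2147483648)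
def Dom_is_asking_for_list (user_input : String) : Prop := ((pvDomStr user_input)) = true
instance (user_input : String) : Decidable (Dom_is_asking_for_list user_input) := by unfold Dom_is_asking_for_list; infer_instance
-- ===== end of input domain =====

-- ===== PORT A =====
-- literal port of A: scan the keyword list, return true on the first keyword contained in the lowered input
def is_asking_for_list_loop (user_input_lower : String) : List String → Bool
  | [] => false
  | keyword :: rest =>
      if PySem.Str.isIn keyword user_input_lower then true
      else is_asking_for_list_loop user_input_lower rest

def is_asking_for_list (user_input : String) : Bool :=
  is_asking_for_list_loop (PySem.Str.lower user_input)
    ["list", "listing", "show me list", "give me list", "in list format", "as a list"]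

-- ===== PORT B =====
-- B: all six keywords contain "list", so one membership test suffices
def is_asking_for_list_alt (user_input : String) : Bool :=
  PySem.Str.isIn "list" (PySem.Str.lower user_input)

-- ===== PRECONDITION & SPEC =====
def Spec_is_asking_for_list (user_input : String) (out : Bool) : Prop := out = is_asking_for_list_alt user_input
instance (user_input : String) (out : Bool) : Decidable (Spec_is_asking_for_list user_input out) := by unfold Spec_is_asking_for_list; infer_instance

-- ===== CLAIM (what is proved, stated in full; the proofs are below) =====
def Claim_equal_is_asking_for_list : Prop := ∀ (user_input : String), Dom_is_asking_for_list user_input → Spec_is_asking_for_list user_input (is_asking_for_list user_input)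

-- ===== LEMMAS AND PROOFS =====

-- ===== VERDICT (by name: the statement is the Claim_ definition above) =====
-- if some keyword of A's list is in s, then "list" is in s (each keyword has "list" as an infix)
theorem loop_eq (s : String) :
    is_asking_for_list_loop s
      ["list", "listing", "show me list", "give me list", "in list format", "as a list"]
      = PySem.Str.isIn "list" s := by
  simp only [is_asking_for_list_loop, PySem.Str.isIn]
  by_cases h : PySem.Chars.isIn "list".toList s.toList = true
  · rw [if_pos h, h]
  · rw [Bool.not_eq_true, PySem.Chars.isIn_eq_false_iff] at h
    have none : ∀ kw : String, ("list".toList <:+: kw.toList) →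
        PySem.Chars.isIn kw.toList s.toList = false := by
      intro kw hkw
      rw [PySem.Chars.isIn_eq_false_iff]
      exact fun hin => h (hkw.trans hin)
    rw [none "listing" (by decide), none "show me list" (by decide),
        none "give me list" (by decide), none "in list format" (by decide),
        none "as a list" (by decide), (PySem.Chars.isIn_eq_false_iff _ _).2 h]
    simp

theorem is_asking_for_list_spec : Claim_equal_is_asking_for_list := by
  intro s _
  unfold Spec_is_asking_for_list is_asking_for_list is_asking_for_list_alt
  exact loop_eq _
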